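-- pv_equiv track=rewrite | github.com/nangert/MMSR24 | Music4All.py | get_total_relevant
-- ===== SOURCE A (Python) =====
-- from typing import List, Dict, Tuple
--
-- def get_total_relevant(query_song: dict, top_genre_weights: Dict[str, set]) -> int:
--     """
--     Determine the total number of relevant items for a query song.
--
--     Args:
--         query_song (dict): The query song.
--         top_genre_weights (Dict[str, set]): Mapping of song IDs to their top genres.
--
--     Returns:
--         int: Total number of relevant items.
--     """
--     query_song_id = query_song.get('song_id', '')
--     query_genres = top_genre_weights.get(query_song_id, set())  # Get top genres for the query song
--
--     if not query_genres:
--         return 0  # No relevant genres, return 0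
--
--     total_relevant = 0
--     for song_id, genres in top_genre_weights.items():
--         if song_id != query_song_id and query_genres & genres:  # Intersection of top genres
--             total_relevant += 1
--
--     return total_relevant
-- ===== SOURCE B (Python) =====
-- def get_total_relevant(query_song: dict, top_genre_weights) -> int:
--     """Inverted-index reformulation: map each genre to the set of songs carrying it,
--     union the buckets of the query's genres, drop the query song, return the size."""
--     query_song_id = query_song.get('song_id', '')
--     query_genres = top_genre_weights.get(query_song_id, set())
--     if not query_genres:
--         return 0
--     index = {}
--     for song_id, genres in top_genre_weights.items():
--         for g in genres:
--             index.setdefault(g, set()).add(song_id)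
--     relevant = set()
--     for g in query_genres:
--         relevant |= index.get(g, set())
--     relevant.discard(query_song_id)
--     return len(relevant)
-- ===== Notes on version B (the rewrite author's own statement) =====
-- stated objective: alternative
-- what changed: Replaces the per-song set-intersection scan with an inverted genre-to-songs index built in one pass; the answer is the size of the union of the query genres' buckets minus the query song itself.
import Mathlib
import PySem

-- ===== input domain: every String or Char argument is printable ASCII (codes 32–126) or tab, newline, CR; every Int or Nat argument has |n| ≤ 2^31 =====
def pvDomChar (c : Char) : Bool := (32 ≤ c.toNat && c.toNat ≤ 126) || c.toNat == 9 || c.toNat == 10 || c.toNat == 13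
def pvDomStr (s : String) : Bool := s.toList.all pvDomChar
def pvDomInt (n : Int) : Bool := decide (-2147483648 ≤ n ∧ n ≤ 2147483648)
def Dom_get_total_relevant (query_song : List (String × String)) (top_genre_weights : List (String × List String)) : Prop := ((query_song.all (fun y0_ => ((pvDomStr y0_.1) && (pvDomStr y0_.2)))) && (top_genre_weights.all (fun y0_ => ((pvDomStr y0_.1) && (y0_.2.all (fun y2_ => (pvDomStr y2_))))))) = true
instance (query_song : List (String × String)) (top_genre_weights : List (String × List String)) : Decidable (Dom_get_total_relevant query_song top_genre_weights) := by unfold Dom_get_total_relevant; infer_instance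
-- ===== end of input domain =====

-- B replaces A's per-song set-intersection scan with an inverted genre→songs index whose
-- query-genre buckets are unioned and the query song discarded (alternative decomposition, same cost class).


-- ===== PORT A =====
def get_total_relevant (query_song : List (String × String)) (top_genre_weights : List (String × List String)) : Int :=
  let query_song_id := PySem.Dict.getD (PySem.Dict.ofList query_song) "song_id" ""
  let tgw := PySem.Dict.ofList top_genre_weights
  let query_genres := PySem.Dict.getD tgw query_song_id []
  if query_genres = [] then 0
  else
    tgw.items.foldl (fun total_relevant p =>
      if p.1 ≠ query_song_id ∧ PySem.Set.inter query_genres p.2 ≠ [] then total_relevant + 1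
      else total_relevant) 0

-- ===== PORT B =====
def get_total_relevant_alt (query_song : List (String × String)) (top_genre_weights : List (String × List String)) : Int :=
  let query_song_id := PySem.Dict.getD (PySem.Dict.ofList query_song) "song_id" ""
  let tgw := PySem.Dict.ofList top_genre_weights
  let query_genres := PySem.Dict.getD tgw query_song_id []
  if query_genres = [] then 0
  else
    let index : PySem.Dict String (PySem.Set String) :=
      tgw.items.foldl (fun d p =>
        p.2.foldl (fun d g => d.modify g [] (fun s => PySem.Set.add s p.1)) d) PySem.Dict.empty
    let relevant : PySem.Set String :=
      query_genres.foldl (fun s g => PySem.Set.union s (PySem.Dict.getD index g [])) PySem.Set.empty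
    ((PySem.Set.discard relevant query_song_id).length : Int)

-- ===== PRECONDITION & SPEC =====
def Spec_get_total_relevant (query_song : List (String × String)) (top_genre_weights : List (String × List String)) (out : Int) : Prop := out = get_total_relevant_alt query_song top_genre_weights
instance (query_song : List (String × String)) (top_genre_weights : List (String × List String)) (out : Int) : Decidable (Spec_get_total_relevant query_song top_genre_weights out) := by unfold Spec_get_total_relevant; infer_instance

-- ===== CLAIM (what is proved, stated in full; the proofs are below) =====
def Claim_equal_get_total_relevant : Prop := ∀ (query_song : List (String × String)) (top_genre_weights : List (String × List String)), Dom_get_total_relevant query_song top_genre_weights → Spec_get_total_relevant query_song top_genre_weights (get_total_relevant query_song top_genre_weights)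

-- ===== LEMMAS AND PROOFS =====

-- bucket of one song: adding sid under every genre of gs touches exactly the keys in gs
theorem pv_inner_getD (gs : List String) (sid : String)
    (d : PySem.Dict String (PySem.Set String)) (g : String) :
    (gs.foldl (fun d g' => d.modify g' [] (fun s => PySem.Set.add s sid)) d).getD g []
      = if g ∈ gs then PySem.Set.add (d.getD g []) sid else d.getD g [] := by
  induction gs generalizing d with
  | nil => simp
  | cons a t ih =>
    simp only [List.foldl_cons, ih, PySem.Dict.getD_modify, List.mem_cons]
    by_cases hga : g = a
    · subst hga
      by_cases hgt : g ∈ t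
      · simp [hgt, PySem.Set.add_of_mem ((PySem.Set.mem_add _ _ _).mpr (Or.inr rfl))]
      · simp [hgt]
    · by_cases hgt : g ∈ t <;> simp [hga, hgt]

-- membership in a bucket of the inverted index
theorem pv_index_mem (its : List (String × List String))
    (d : PySem.Dict String (PySem.Set String)) (g y : String) :
    y ∈ (its.foldl (fun d p =>
        p.2.foldl (fun d g' => d.modify g' [] (fun s => PySem.Set.add s p.1)) d) d).getD g []
      ↔ y ∈ d.getD g [] ∨ ∃ p ∈ its, y = p.1 ∧ g ∈ p.2 := by
  induction its generalizing d with
  | nil => simp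
  | cons q t ih =>
    simp only [List.foldl_cons, ih, pv_inner_getD, List.mem_cons]
    by_cases hg : g ∈ q.2 <;> simp [hg, PySem.Set.mem_add] <;> tauto

-- membership in the union of the query genres' buckets
theorem pv_union_mem (qgl : List String) (idx : PySem.Dict String (PySem.Set String))
    (s : PySem.Set String) (y : String) :
    y ∈ qgl.foldl (fun s g => PySem.Set.union s (idx.getD g [])) s
      ↔ y ∈ s ∨ ∃ g ∈ qgl, y ∈ idx.getD g [] := by
  induction qgl generalizing s with
  | nil => simp
  | cons a t ih => simp [ih, PySem.Set.mem_union, or_assoc]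

-- the union of buckets stays duplicate-free
theorem pv_union_nodup (qgl : List String) (idx : PySem.Dict String (PySem.Set String))
    (s : PySem.Set String) (hs : s.Nodup) :
    (qgl.foldl (fun s g => PySem.Set.union s (idx.getD g [])) s).Nodup := by
  induction qgl generalizing s with
  | nil => exact hs
  | cons a t ih => exact ih _ (PySem.Set.nodup_union _ _ hs)

-- nonemptiness of a set intersection is a shared element
theorem pv_inter_ne_nil (s t : PySem.Set String) :
    PySem.Set.inter s t ≠ [] ↔ ∃ g ∈ s, g ∈ t := by
  rw [← List.isEmpty_eq_false_iff, List.isEmpty_eq_false_iff_exists_mem]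
  simp [PySem.Set.mem_inter]

-- ===== VERDICT (by name: the statement is the Claim_ definition above) =====
theorem get_total_relevant_spec : Claim_equal_get_total_relevant := by
  intro qs tgwl _
  unfold Spec_get_total_relevant get_total_relevant get_total_relevant_alt
  simp only []
  set qid := PySem.Dict.getD (PySem.Dict.ofList qs) "song_id" "" with hqid
  set tgw := PySem.Dict.ofList tgwl with htgw
  set qg := PySem.Dict.getD tgw qid [] with hqg
  by_cases h0 : qg = []
  · simp [h0]
  · simp only [h0, if_neg, not_false_iff]
    set items := tgw.items with hitems
    set Pb : String × List String → Bool :=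
      fun p => decide (p.1 ≠ qid ∧ PySem.Set.inter qg p.2 ≠ []) with hPb
    set index : PySem.Dict String (PySem.Set String) :=
      items.foldl (fun d p =>
        p.2.foldl (fun d g => d.modify g [] (fun s => PySem.Set.add s p.1)) d) PySem.Dict.empty with hindex
    set relevant : PySem.Set String :=
      qg.foldl (fun s g => PySem.Set.union s (PySem.Dict.getD index g [])) PySem.Set.empty with hrel
    have hndrel : (PySem.Set.discard relevant qid).Nodup :=
      PySem.Set.nodup_discard _ _ (pv_union_nodup _ _ _ List.nodup_nil)
    have hkeys : (items.map (fun p => p.1)).Nodup := by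
      have h := PySem.Dict.nodup_keys_ofList tgwl
      simpa [PySem.Dict.keys, ← htgw, ← hitems] using h
    have hndL : ((items.filter Pb).map (fun p => p.1)).Nodup :=
      (List.filter_sublist.map _).nodup hkeys
    have hmem : ∀ y, y ∈ PySem.Set.discard relevant qid ↔ y ∈ (items.filter Pb).map (fun p => p.1) := by
      intro y
      rw [PySem.Set.mem_discard, hrel, pv_union_mem]
      simp only [hindex, pv_index_mem, PySem.Dict.getD_empty, List.not_mem_nil, false_or,
        List.mem_map, List.mem_filter, hPb, decide_eq_true_eq]
      constructor
      · rintro ⟨(h | ⟨g, hgq, p, hp, rfl, hgp⟩), hy⟩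
        · cases h
        · exact ⟨p, ⟨hp, hy, (pv_inter_ne_nil _ _).mpr ⟨g, hgq, hgp⟩⟩, rfl⟩
      · rintro ⟨p, ⟨hp, hne, hint⟩, rfl⟩
        obtain ⟨g, hgq, hgp⟩ := (pv_inter_ne_nil _ _).mp hint
        exact ⟨Or.inr ⟨g, hgq, p, hp, rfl, hgp⟩, hne⟩
    have hlen : (PySem.Set.discard relevant qid).length = items.countP Pb := by
      have hperm := (List.perm_ext_iff_of_nodup hndrel hndL).mpr hmem
      rw [hperm.length_eq, List.length_map, List.countP_eq_length_filter]
    rw [PySem.List.foldl_ite_add_one (p := fun p : String × List String =>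
        p.1 ≠ qid ∧ PySem.Set.inter qg p.2 ≠ []), hlen]
    simp [hPb]
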